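-- pv_equiv track=rewrite | github.com/tekinmuhammed/LeetCode-Solves | Easy/717. 1-bit and 2-bit Characters/717. 1-bit and 2-bit Characters.py | isOneBitCharacter
-- ===== SOURCE A (Python) =====
-- def isOneBitCharacter(bits):
--     """
--     :type bits: List[int]
--     :rtype: bool
--     """
--     i = 0
--     n = len(bits)
--
--     while i < n - 1:  # last bit is checked separately
--         if bits[i] == 1:
--             i += 2   # 2-bit character
--         else:
--             i += 1   # 1-bit character
--
--     return i == n - 1
-- ===== SOURCE B (Python) =====
-- def isOneBitCharacter(bits):
--     # Count the run of consecutive 1s immediately before the last element;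
--     # the last element is a one-bit character iff that run has even length.
--     count = 0
--     for b in reversed(bits[:-1]):
--         if b != 1:
--             break
--         count += 1
--     return len(bits) > 0 and count % 2 == 0
-- ===== Notes on version B (the rewrite author's own statement) =====
-- stated objective: faster
-- what changed: Replaces the forward greedy parse (cursor jumping 1 or 2 over the whole list) with a backward scan that counts the run of 1s immediately before the last element and returns whether that count is even.
import Mathlib
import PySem

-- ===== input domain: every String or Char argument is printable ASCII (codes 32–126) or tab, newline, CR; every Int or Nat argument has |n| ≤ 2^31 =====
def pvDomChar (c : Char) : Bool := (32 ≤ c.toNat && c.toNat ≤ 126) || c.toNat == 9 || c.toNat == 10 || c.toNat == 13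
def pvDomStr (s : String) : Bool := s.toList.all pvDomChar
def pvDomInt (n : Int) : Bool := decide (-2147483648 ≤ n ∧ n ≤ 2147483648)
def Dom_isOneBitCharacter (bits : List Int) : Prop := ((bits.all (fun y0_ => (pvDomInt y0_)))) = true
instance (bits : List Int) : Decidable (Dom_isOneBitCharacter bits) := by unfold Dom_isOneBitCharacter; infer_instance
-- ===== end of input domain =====

-- B replaces A's forward greedy cursor by a backward count of the run of 1s before
-- the last element (even run ⟺ last element stands alone); alternative algorithm, same cost.

-- ===== PORT A =====
-- the while loop of A: i advances by 2 on a 1-bit, else by 1, while i < n - 1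
def pvALoop (bits : List Int) (n i : Int) : Int :=
  if h : i < n - 1 then
    if PySem.List.pyGet? bits i = some 1 then pvALoop bits n (i + 2)
    else pvALoop bits n (i + 1)
  else i
termination_by (n - i).toNat
decreasing_by all_goals omega

def isOneBitCharacter (bits : List Int) : Bool :=
  pvALoop bits bits.length 0 == bits.length - 1

-- ===== PORT B =====
-- the for-loop of B: count leading 1s (the loop breaks at the first non-1)
def pvCount1 : List Int → Int
  | [] => 0
  | b :: rest => if b ≠ 1 then 0 else pvCount1 rest + 1

def isOneBitCharacter_alt (bits : List Int) : Bool :=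
  let count := pvCount1 ((PySem.List.slice bits none (some (-1))).reverse)
  decide (0 < bits.length) && (PySem.Int.mod count 2 == 0)

-- ===== PRECONDITION & SPEC =====
def Spec_isOneBitCharacter (bits : List Int) (out : Bool) : Prop := out = isOneBitCharacter_alt bits
instance (bits : List Int) (out : Bool) : Decidable (Spec_isOneBitCharacter bits out) := by unfold Spec_isOneBitCharacter; infer_instance

-- ===== CLAIM (what is proved, stated in full; the proofs are below) =====
def Claim_equal_isOneBitCharacter : Prop := ∀ (bits : List Int), Dom_isOneBitCharacter bits → Spec_isOneBitCharacter bits (isOneBitCharacter bits)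

-- ===== LEMMAS AND PROOFS =====

-- proof-only structural description of A's parse: offset the cursor ends up adding
def pvParse : List Int → Int
  | [] => 0
  | [_] => 0
  | a :: b :: rest =>
    if a = 1 then 2 + pvParse rest else 1 + pvParse (b :: rest)

lemma pvParse_cons₂ (a b : Int) (rest : List Int) :
    pvParse (a :: b :: rest) = if a = 1 then 2 + pvParse rest else 1 + pvParse (b :: rest) := by
  simp [pvParse]

lemma pvCount1_nonneg (l : List Int) : 0 ≤ pvCount1 l := by
  induction l with
  | nil => simp [pvCount1]
  | cons b rest ih => simp only [pvCount1]; split <;> omega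

lemma pvCount1_le_length (l : List Int) : pvCount1 l ≤ l.length := by
  induction l with
  | nil => simp [pvCount1]
  | cons b rest ih => simp only [pvCount1, List.length_cons]; split <;> push_cast <;> omega

lemma pvCount1_append (u v : List Int) :
    pvCount1 (u ++ v) = if pvCount1 u = u.length then (u.length : Int) + pvCount1 v else pvCount1 u := by
  induction u with
  | nil => simp [pvCount1]
  | cons b rest ih =>
    have h1 := pvCount1_le_length rest
    simp only [List.cons_append, pvCount1, List.length_cons, ih]
    split <;> split_ifs <;> push_cast <;> omega

-- A's loop from cursor i adds exactly pvParse of the remaining suffix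
lemma pvALoop_eq_parse (l : List Int) :
    ∀ i : Int, 0 ≤ i → pvALoop l l.length i = i + pvParse (l.drop i.toNat) := by
  intro i
  induction hm : (l.length - i).toNat using Nat.strong_induction_on generalizing i with
  | _ m ih =>
  intro hi
  rw [pvALoop]
  by_cases hlt : i < (l.length : Int) - 1
  · -- i < length - 1, so the suffix has at least two elements
    rw [dif_pos hlt]
    have hlen : 2 ≤ (l.drop i.toNat).length := by
      simp only [List.length_drop]; omega
    obtain ⟨a, b, rest, hd⟩ : ∃ a b rest, l.drop i.toNat = a :: b :: rest := by
      match hdm : l.drop i.toNat with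
      | [] => rw [hdm] at hlen; simp at hlen
      | [x] => rw [hdm] at hlen; simp at hlen
      | a :: b :: rest => exact ⟨a, b, rest, rfl⟩
    have hget : PySem.List.pyGet? l i = some a := by
      rw [PySem.List.pyGet?_of_nonneg l hi]
      have h0 : (l.drop i.toNat)[0]? = some a := by rw [hd]; rfl
      rwa [List.getElem?_drop, Nat.add_zero] at h0
    have hdrop1 : l.drop (i + 1).toNat = b :: rest := by
      have : l.drop (i + 1).toNat = (l.drop i.toNat).drop 1 := by
        rw [List.drop_drop]; congr 1; omega
      rw [this, hd]; rfl
    have hdrop2 : l.drop (i + 2).toNat = rest := by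
      have : l.drop (i + 2).toNat = (l.drop i.toNat).drop 2 := by
        rw [List.drop_drop]; congr 1; omega
      rw [this, hd]; rfl
    rw [hget, hd, pvParse_cons₂]
    by_cases ha : a = 1
    · rw [if_pos (by rw [ha]), if_pos ha,
        ih ((l.length : Int) - (i + 2)).toNat (by omega) (i + 2) rfl (by omega), hdrop2]
      omega
    · rw [if_neg (by simpa using ha), if_neg ha,
        ih ((l.length : Int) - (i + 1)).toNat (by omega) (i + 1) rfl (by omega), hdrop1]
      omega
  · -- loop ends: suffix has length ≤ 1, pvParse of it is 0
    rw [dif_neg hlt]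
    have hle : (l.drop i.toNat).length ≤ 1 := by
      simp only [List.length_drop]; omega
    have hz : pvParse (l.drop i.toNat) = 0 := by
      match hdm : l.drop i.toNat with
      | [] => simp [pvParse]
      | [x] => simp [pvParse]
      | a :: b :: rest => rw [hdm] at hle; simp at hle
    omega

-- the heart: forward parse lands on length-1 iff the run of 1s before the last element is even
lemma pvParse_char (l : List Int) :
    (pvParse l = (l.length : Int) - 1 ↔ l ≠ [] ∧ pvCount1 l.dropLast.reverse % 2 = 0) ∧
    (pvParse l = (l.length : Int) - 1 ∨ pvParse l = (l.length : Int)) := by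
  induction hm : l.length using Nat.strong_induction_on generalizing l with
  | _ m ih =>
  subst hm
  match l with
  | [] => simp [pvParse]
  | [x] => simp [pvParse, pvCount1]
  | a :: b :: rest =>
    rw [pvParse_cons₂]
    by_cases ha : a = 1
    · subst ha
      match rest with
      | [] =>
        norm_num [pvParse, pvCount1]
      | c :: rest' =>
        obtain ⟨iff1, or1⟩ := ih (c :: rest').length (by simp) (c :: rest') rfl
        have hne : (c :: rest') ≠ [] := by simp
        have hdl : (1 :: b :: c :: rest').dropLast.reverse
            = (c :: rest').dropLast.reverse ++ [b, 1] := by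
          simp [List.dropLast]
        have hcap := pvCount1_append ((c :: rest').dropLast.reverse) [b, 1]
        have hparity : pvCount1 ((1 :: b :: c :: rest').dropLast.reverse) % 2
            = pvCount1 ((c :: rest').dropLast.reverse) % 2 := by
          rw [hdl, hcap]
          have h2 : pvCount1 [b, (1 : Int)] = 0 ∨ pvCount1 [b, (1 : Int)] = 2 := by
            by_cases hb : b = 1 <;> simp [pvCount1, hb]
          split
          · omega
          · rfl
        constructor
        · constructor
          · intro h
            refine ⟨by simp, ?_⟩
            rw [hparity]
            have : pvParse (c :: rest') = ((c :: rest').length : Int) - 1 := by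
              simp only [List.length_cons] at h ⊢; push_cast at h ⊢; omega
            exact (iff1.mp this).2
          · rintro ⟨-, h⟩
            rw [hparity] at h
            have := iff1.mpr ⟨hne, h⟩
            simp only [List.length_cons] at this ⊢; push_cast at this ⊢; omega
        · simp only [List.length_cons] at or1 ⊢
          push_cast at or1 ⊢; omega
    · -- a ≠ 1: stripping a from the front changes neither side's verdict
      obtain ⟨iff1, or1⟩ := ih (b :: rest).length (by simp) (b :: rest) rfl
      have hdl : (a :: b :: rest).dropLast.reverse = (b :: rest).dropLast.reverse ++ [a] := by
        simp [List.dropLast]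
      have hcnt : pvCount1 ((a :: b :: rest).dropLast.reverse)
          = pvCount1 ((b :: rest).dropLast.reverse) := by
        rw [hdl, pvCount1_append]
        split_ifs with hfull
        · have h0 : pvCount1 [a] = 0 := by simp [pvCount1, ha]
          rw [h0, hfull]; omega
        · rfl
      constructor
      · simp only [if_neg ha]
        constructor
        · intro h
          refine ⟨by simp, ?_⟩
          rw [hcnt]
          have : pvParse (b :: rest) = ((b :: rest).length : Int) - 1 := by
            simp only [List.length_cons] at h ⊢; push_cast at h ⊢; omega
          exact (iff1.mp this).2
        · rintro ⟨-, h⟩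
          rw [hcnt] at h
          have := iff1.mpr ⟨by simp, h⟩
          simp only [List.length_cons] at this ⊢; push_cast at this ⊢; omega
      · simp only [if_neg ha, List.length_cons] at or1 ⊢
        push_cast at or1 ⊢; omega

-- ===== VERDICT (by name: the statement is the Claim_ definition above) =====
theorem isOneBitCharacter_spec : Claim_equal_isOneBitCharacter := by
  intro bits _
  unfold Spec_isOneBitCharacter isOneBitCharacter isOneBitCharacter_alt
  rw [PySem.List.slice_to_neg_one]
  have hA := pvALoop_eq_parse bits 0 le_rfl
  simp only [Int.toNat_zero, List.drop_zero, zero_add] at hA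
  rw [hA]
  obtain ⟨hiff, hor⟩ := pvParse_char bits
  have hc0 := pvCount1_nonneg (bits.dropLast.reverse)
  have hmod : PySem.Int.mod (pvCount1 bits.dropLast.reverse) 2
      = pvCount1 bits.dropLast.reverse % 2 :=
    PySem.Int.mod_eq_emod_of_pos (by omega)
  simp only [hmod]
  by_cases h : pvParse bits = (bits.length : Int) - 1
  · have ⟨hne, heven⟩ := hiff.mp h
    have hpos : 0 < bits.length := List.length_pos_iff.mpr hne
    simp [h, hpos, heven]
  · rcases hor with h' | h'
    · exact absurd h' h
    · have hne : ¬ (bits ≠ [] ∧ pvCount1 bits.dropLast.reverse % 2 = 0) := fun hx => h (hiff.mpr hx)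
      match bits, h', hne with
      | [], _, _ => simp [pvParse, pvCount1]
      | x :: xs, h', hne =>
        have hodd : pvCount1 ((x :: xs).dropLast.reverse) % 2 ≠ 0 := by
          intro hz; exact hne ⟨by simp, hz⟩
        simp [h', hodd]
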